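-- pv_equiv track=rewrite | github.com/StephenYPan/improved-heuristcs-disjoint-cbs | cbs.py | find_extended_mdd_conflict
-- ===== SOURCE A (Python) =====
-- def find_extended_mdd_conflict(mdds, paths):
--     """
--     Return true if there exists a cardinal conflict with the extended mdd, otherwise false.
--     """
--     start = min(len(paths[0]), len(paths[1]))
--     end = max(len(paths[0]), len(paths[1]))
--     if start == end:
--         return False
--     if len(paths[0]) > len(paths[1]):
--         mdds[0], mdds[1] = mdds[1], mdds[0]
--         paths[0], paths[1] = paths[1], paths[0]
--     vertex = paths[0][-1]
--     mdd = [(t, e) for t, e in mdds[1] if t >= start]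
--     for i in range(start, end):
--         mdd_vertex = set([e[1] for t, e in mdd if t == i])
--         if len(mdd_vertex) == 1 and mdd_vertex == {vertex}:
--             return True
--     return False
-- ===== SOURCE B (Python) =====
-- def find_extended_mdd_conflict(mdds, paths):
--     """
--     Return true if there exists a cardinal conflict with the extended mdd, otherwise false.
--     One pass over the longer path's MDD edges: collect time steps with an edge into
--     `vertex` (good) and time steps with an edge elsewhere (bad); a cardinal conflict
--     exists iff some time step is good and never bad.
--     """
--     start = min(len(paths[0]), len(paths[1]))
--     end = max(len(paths[0]), len(paths[1]))
--     if start == end: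
--         return False
--     if len(paths[0]) > len(paths[1]):
--         mdds[0], mdds[1] = mdds[1], mdds[0]
--         paths[0], paths[1] = paths[1], paths[0]
--     vertex = paths[0][-1]
--     good, bad = set(), set()
--     for t, e in mdds[1]:
--         if start <= t < end:
--             (good if e[1] == vertex else bad).add(t)
--     return bool(good - bad)
-- ===== Notes on version B (the rewrite author's own statement) =====
-- stated objective: alternative
-- what changed: Instead of rescanning the filtered MDD edge list once per time step and comparing the destination set with {vertex}, B makes a single pass over the MDD edges with start <= t < end, accumulating the set of time steps with an edge into vertex (good) and the set with an edge elsewhere (bad), and returns whether good - bad is nonempty.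
import Mathlib
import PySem

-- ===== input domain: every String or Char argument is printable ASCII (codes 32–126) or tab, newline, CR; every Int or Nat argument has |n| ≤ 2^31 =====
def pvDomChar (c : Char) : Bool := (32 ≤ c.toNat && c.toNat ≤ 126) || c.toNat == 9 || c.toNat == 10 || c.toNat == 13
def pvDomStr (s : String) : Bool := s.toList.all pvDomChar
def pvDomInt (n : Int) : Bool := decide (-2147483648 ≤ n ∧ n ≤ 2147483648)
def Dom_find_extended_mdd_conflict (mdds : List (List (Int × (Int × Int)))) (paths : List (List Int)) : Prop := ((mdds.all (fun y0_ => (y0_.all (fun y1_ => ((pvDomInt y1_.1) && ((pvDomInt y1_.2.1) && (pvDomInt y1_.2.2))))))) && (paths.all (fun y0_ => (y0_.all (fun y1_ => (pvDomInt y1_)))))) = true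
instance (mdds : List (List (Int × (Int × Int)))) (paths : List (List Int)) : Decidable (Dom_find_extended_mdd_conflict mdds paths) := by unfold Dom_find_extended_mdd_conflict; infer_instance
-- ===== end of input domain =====

-- B replaces A's per-time-step rescan of the MDD with a single edge pass building two
-- time-step sets (good/bad) and a set difference; same return value, and B performs the
-- same in-place swap mutation of mdds/paths as A.


-- ===== PORT A =====
-- The in-place swap of mdds[0]/mdds[1] and paths[0]/paths[1] is represented by the
-- pairs mdds2/paths2 (only index 0/1 are ever used afterwards).
def find_extended_mdd_conflict (mdds : List (List (Int × (Int × Int)))) (paths : List (List Int)) : Bool :=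
  let p0 := paths.getD 0 []
  let p1 := paths.getD 1 []
  let start : Int := (min p0.length p1.length : Nat)
  let stop : Int := (max p0.length p1.length : Nat)
  if start = stop then false
  else
    let mdds2 : List (Int × (Int × Int)) × List (Int × (Int × Int)) :=
      if p0.length > p1.length then (mdds.getD 1 [], mdds.getD 0 []) else (mdds.getD 0 [], mdds.getD 1 [])
    let paths2 : List Int × List Int :=
      if p0.length > p1.length then (p1, p0) else (p0, p1)
    let vertex : Int := PySem.List.pyGetD paths2.1 (-1) 0
    let mdd := mdds2.2.filter (fun te => start ≤ te.1)
    (PySem.List.pyRange start stop 1).any (fun i =>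
      let mdd_vertex : PySem.Set Int :=
        PySem.Set.ofList ((mdd.filter (fun te => te.1 = i)).map (fun te => te.2.2))
      decide (mdd_vertex.length = 1) && PySem.Set.equal mdd_vertex (PySem.Set.ofList [vertex]))

-- ===== PORT B =====
def find_extended_mdd_conflict_alt (mdds : List (List (Int × (Int × Int)))) (paths : List (List Int)) : Bool :=
  let p0 := paths.getD 0 []
  let p1 := paths.getD 1 []
  let start : Int := (min p0.length p1.length : Nat)
  let stop : Int := (max p0.length p1.length : Nat)
  if start = stop then false
  else
    let longMdd := if p0.length > p1.length then mdds.getD 0 [] else mdds.getD 1 []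
    let short := if p0.length > p1.length then p1 else p0
    let vertex : Int := PySem.List.pyGetD short (-1) 0
    let gb := longMdd.foldl
      (fun (gb : PySem.Set Int × PySem.Set Int) te =>
        if start ≤ te.1 ∧ te.1 < stop then
          if te.2.2 = vertex then (PySem.Set.add gb.1 te.1, gb.2)
          else (gb.1, PySem.Set.add gb.2 te.1)
        else gb)
      (PySem.Set.empty, PySem.Set.empty)
    !(PySem.Set.diff gb.1 gb.2).isEmpty

-- ===== PRECONDITION & SPEC =====
-- Pre_ excludes exactly the inputs on which the Python A raises IndexError:
-- fewer than two paths; or paths of different lengths with fewer than two mdds,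
-- or with an empty shorter path (paths[0][-1] after the swap).
def Pre_find_extended_mdd_conflict (mdds : List (List (Int × (Int × Int)))) (paths : List (List Int)) : Prop :=
  2 ≤ paths.length ∧
  ((paths.getD 0 []).length = (paths.getD 1 []).length ∨
    (2 ≤ mdds.length ∧ 0 < min (paths.getD 0 []).length (paths.getD 1 []).length))
instance (mdds : List (List (Int × (Int × Int)))) (paths : List (List Int)) : Decidable (Pre_find_extended_mdd_conflict mdds paths) := by unfold Pre_find_extended_mdd_conflict; infer_instance

def pvWitness_find_extended_mdd_conflict : (List (List (Int × (Int × Int)))) × List (List Int) :=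
  ([[(0, (0, 0))], [(1, (0, 1))]], [[0], [0, 1]])

def Spec_find_extended_mdd_conflict (mdds : List (List (Int × (Int × Int)))) (paths : List (List Int)) (out : Bool) : Prop := out = find_extended_mdd_conflict_alt mdds paths
instance (mdds : List (List (Int × (Int × Int)))) (paths : List (List Int)) (out : Bool) : Decidable (Spec_find_extended_mdd_conflict mdds paths out) := by unfold Spec_find_extended_mdd_conflict; infer_instance

-- ===== CLAIM (what is proved, stated in full; the proofs are below) =====
def Claim_equal_find_extended_mdd_conflict : Prop := ∀ (mdds : List (List (Int × (Int × Int)))) (paths : List (List Int)), Dom_find_extended_mdd_conflict mdds paths → Pre_find_extended_mdd_conflict mdds paths → Spec_find_extended_mdd_conflict mdds paths (find_extended_mdd_conflict mdds paths)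

-- ===== LEMMAS AND PROOFS =====

-- A Nodup list whose members are exactly v is [v].
lemma pv_nodup_all_eq (l : List Int) (v : Int) (hn : l.Nodup) (hm : v ∈ l)
    (ha : ∀ x ∈ l, x = v) : l = [v] := by
  cases l with
  | nil => cases hm
  | cons a rest =>
    have hav : a = v := ha a (List.mem_cons_self ..)
    cases rest with
    | nil => simp [hav]
    | cons b r =>
      have hbv : b = v := ha b (by simp)
      exfalso
      have : a ∉ b :: r := (List.nodup_cons.mp hn).1
      exact this (by simp [hav, hbv])

-- Python's `len(set(xs)) == 1 and set(xs) == {v}` characterised on the underlying list.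
lemma pv_singleton_iff (xs : List Int) (v : Int) :
    (decide ((PySem.Set.ofList xs).length = 1) &&
      PySem.Set.equal (PySem.Set.ofList xs) (PySem.Set.ofList [v])) = true ↔
    (v ∈ xs ∧ ∀ x ∈ xs, x = v) := by
  have hv : PySem.Set.ofList [v] = [v] := by
    apply PySem.Set.ofList_eq_self_of_nodup; simp
  constructor
  · intro h
    have heq := (PySem.Set.equal_iff _ _).mp (Bool.and_eq_true .. ▸ h).2
    simp only [hv, PySem.Set.mem_ofList, List.mem_singleton] at heq
    exact ⟨(heq v).mpr rfl, fun x hx => (heq x).mp hx⟩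
  · rintro ⟨hvm, hall⟩
    have hS : PySem.Set.ofList xs = [v] := by
      apply pv_nodup_all_eq _ _ (PySem.Set.nodup_ofList xs)
      · exact (PySem.Set.mem_ofList ..).mpr hvm
      · intro x hx
        exact hall x ((PySem.Set.mem_ofList ..).mp hx)
    rw [hS, hv]
    simp [PySem.Set.equal_iff]

-- Membership in the `good` set built by B's fold.
lemma pv_mem_fold_fst (s e v : Int) :
    ∀ (L : List (Int × (Int × Int))) (g b : PySem.Set Int) (t : Int),
    (t ∈ (L.foldl
      (fun (gb : PySem.Set Int × PySem.Set Int) te =>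
        if s ≤ te.1 ∧ te.1 < e then
          if te.2.2 = v then (PySem.Set.add gb.1 te.1, gb.2)
          else (gb.1, PySem.Set.add gb.2 te.1)
        else gb) (g, b)).1) ↔
    (t ∈ g ∨ ∃ te ∈ L, s ≤ te.1 ∧ te.1 < e ∧ te.2.2 = v ∧ te.1 = t) := by
  intro L
  induction L with
  | nil => simp
  | cons a L ih =>
    intro g b t
    simp only [List.foldl_cons]
    by_cases h1 : s ≤ a.1 ∧ a.1 < e
    · rw [if_pos h1]
      by_cases h2 : a.2.2 = v
      · rw [if_pos h2, ih, PySem.Set.mem_add]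
        constructor
        · rintro ((hg | rfl) | ⟨te, hm, hp⟩)
          · exact Or.inl hg
          · exact Or.inr ⟨a, List.mem_cons_self .., h1.1, h1.2, h2, rfl⟩
          · exact Or.inr ⟨te, List.mem_cons_of_mem _ hm, hp⟩
        · rintro (hg | ⟨te, hm, hp⟩)
          · exact Or.inl (Or.inl hg)
          · rcases List.mem_cons.mp hm with rfl | hm
            · exact Or.inl (Or.inr hp.2.2.2.symm)
            · exact Or.inr ⟨te, hm, hp⟩
      · rw [if_neg h2, ih]
        constructor
        · rintro (hg | ⟨te, hm, hp⟩)
          · exact Or.inl hg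
          · exact Or.inr ⟨te, List.mem_cons_of_mem _ hm, hp⟩
        · rintro (hg | ⟨te, hm, hp⟩)
          · exact Or.inl hg
          · rcases List.mem_cons.mp hm with rfl | hm
            · exact absurd hp.2.2.1 h2
            · exact Or.inr ⟨te, hm, hp⟩
    · rw [if_neg h1, ih]
      constructor
      · rintro (hg | ⟨te, hm, hp⟩)
        · exact Or.inl hg
        · exact Or.inr ⟨te, List.mem_cons_of_mem _ hm, hp⟩
      · rintro (hg | ⟨te, hm, hp⟩)
        · exact Or.inl hg
        · rcases List.mem_cons.mp hm with rfl | hm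
          · exact absurd ⟨hp.1, hp.2.1⟩ h1
          · exact Or.inr ⟨te, hm, hp⟩

-- Membership in the `bad` set built by B's fold.
lemma pv_mem_fold_snd (s e v : Int) :
    ∀ (L : List (Int × (Int × Int))) (g b : PySem.Set Int) (t : Int),
    (t ∈ (L.foldl
      (fun (gb : PySem.Set Int × PySem.Set Int) te =>
        if s ≤ te.1 ∧ te.1 < e then
          if te.2.2 = v then (PySem.Set.add gb.1 te.1, gb.2)
          else (gb.1, PySem.Set.add gb.2 te.1)
        else gb) (g, b)).2) ↔
    (t ∈ b ∨ ∃ te ∈ L, s ≤ te.1 ∧ te.1 < e ∧ te.2.2 ≠ v ∧ te.1 = t) := by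
  intro L
  induction L with
  | nil => simp
  | cons a L ih =>
    intro g b t
    simp only [List.foldl_cons]
    by_cases h1 : s ≤ a.1 ∧ a.1 < e
    · rw [if_pos h1]
      by_cases h2 : a.2.2 = v
      · rw [if_pos h2, ih]
        constructor
        · rintro (hg | ⟨te, hm, hp⟩)
          · exact Or.inl hg
          · exact Or.inr ⟨te, List.mem_cons_of_mem _ hm, hp⟩
        · rintro (hg | ⟨te, hm, hp⟩)
          · exact Or.inl hg
          · rcases List.mem_cons.mp hm with rfl | hm
            · exact absurd h2 hp.2.2.1
            · exact Or.inr ⟨te, hm, hp⟩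
      · rw [if_neg h2, ih, PySem.Set.mem_add]
        constructor
        · rintro ((hg | rfl) | ⟨te, hm, hp⟩)
          · exact Or.inl hg
          · exact Or.inr ⟨a, List.mem_cons_self .., h1.1, h1.2, h2, rfl⟩
          · exact Or.inr ⟨te, List.mem_cons_of_mem _ hm, hp⟩
        · rintro (hg | ⟨te, hm, hp⟩)
          · exact Or.inl (Or.inl hg)
          · rcases List.mem_cons.mp hm with rfl | hm
            · exact Or.inl (Or.inr hp.2.2.2.symm)
            · exact Or.inr ⟨te, hm, hp⟩
    · rw [if_neg h1, ih]
      constructor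
      · rintro (hg | ⟨te, hm, hp⟩)
        · exact Or.inl hg
        · exact Or.inr ⟨te, List.mem_cons_of_mem _ hm, hp⟩
      · rintro (hg | ⟨te, hm, hp⟩)
        · exact Or.inl hg
        · rcases List.mem_cons.mp hm with rfl | hm
          · exact absurd ⟨hp.1, hp.2.1⟩ h1
          · exact Or.inr ⟨te, hm, hp⟩

-- The common propositional content: some time step in [s,e) whose edges all end in v.
def pvQ (L : List (Int × (Int × Int))) (s e v : Int) : Prop :=
  ∃ i, s ≤ i ∧ i < e ∧ (∃ te ∈ L, te.1 = i ∧ te.2.2 = v) ∧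
    (∀ te ∈ L, te.1 = i → te.2.2 = v)

lemma pv_A_iff (L : List (Int × (Int × Int))) (s e v : Int) :
    ((PySem.List.pyRange s e 1).any (fun i =>
      decide ((PySem.Set.ofList (((L.filter (fun te => s ≤ te.1)).filter
          (fun te => te.1 = i)).map (fun te => te.2.2))).length = 1) &&
        PySem.Set.equal
          (PySem.Set.ofList (((L.filter (fun te => s ≤ te.1)).filter
            (fun te => te.1 = i)).map (fun te => te.2.2)))
          (PySem.Set.ofList [v])) = true) ↔ pvQ L s e v := by
  rw [List.any_eq_true]
  constructor
  · rintro ⟨i, hi, hcond⟩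
    rw [PySem.List.mem_pyRange_one] at hi
    rw [pv_singleton_iff] at hcond
    rcases hcond with ⟨hvm, hall⟩
    simp only [List.mem_map, List.mem_filter, decide_eq_true_eq] at hvm hall
    rcases hvm with ⟨te, ⟨⟨hmem, _⟩, hti⟩, hdest⟩
    refine ⟨i, hi.1, hi.2, ⟨te, hmem, hti, hdest⟩, ?_⟩
    intro te' hm' ht'
    exact hall te'.2.2 ⟨te', ⟨⟨hm', by rw [ht']; exact hi.1⟩, ht'⟩, rfl⟩
  · rintro ⟨i, h1, h2, ⟨te, hm, hti, hdest⟩, hall⟩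
    refine ⟨i, (PySem.List.mem_pyRange_one ..).mpr ⟨h1, h2⟩, ?_⟩
    rw [pv_singleton_iff]
    constructor
    · exact List.mem_map.mpr ⟨te, List.mem_filter.mpr
        ⟨List.mem_filter.mpr ⟨hm, by simpa [hti] using h1⟩, by simpa using hti⟩, hdest⟩
    · intro x hx
      simp only [List.mem_map, List.mem_filter, decide_eq_true_eq] at hx
      rcases hx with ⟨te', ⟨⟨hm', _⟩, ht'⟩, rfl⟩
      exact hall te' hm' ht'

lemma pv_B_iff (L : List (Int × (Int × Int))) (s e v : Int) :
    ((!(PySem.Set.diff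
        (L.foldl
          (fun (gb : PySem.Set Int × PySem.Set Int) te =>
            if s ≤ te.1 ∧ te.1 < e then
              if te.2.2 = v then (PySem.Set.add gb.1 te.1, gb.2)
              else (gb.1, PySem.Set.add gb.2 te.1)
            else gb) (PySem.Set.empty, PySem.Set.empty)).1
        (L.foldl
          (fun (gb : PySem.Set Int × PySem.Set Int) te =>
            if s ≤ te.1 ∧ te.1 < e then
              if te.2.2 = v then (PySem.Set.add gb.1 te.1, gb.2)
              else (gb.1, PySem.Set.add gb.2 te.1)
            else gb) (PySem.Set.empty, PySem.Set.empty)).2).isEmpty) = true) ↔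
    pvQ L s e v := by
  simp only [Bool.not_eq_true', List.isEmpty_eq_false_iff_exists_mem]
  constructor
  · rintro ⟨t, ht⟩
    rw [PySem.Set.mem_diff] at ht
    rcases ht with ⟨hg, hb⟩
    rw [pv_mem_fold_fst] at hg
    rcases hg with hg | ⟨te, hm, hs, hlt, hdest, hti⟩
    · cases hg
    · refine ⟨t, hti ▸ hs, hti ▸ hlt, ⟨te, hm, hti, hdest⟩, ?_⟩
      intro te' hm' ht'
      by_contra hne
      exact hb ((pv_mem_fold_snd s e v L _ _ t).mpr
        (Or.inr ⟨te', hm', by rw [ht']; exact hti ▸ hs, by rw [ht']; exact hti ▸ hlt, hne, ht'⟩))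
  · rintro ⟨i, h1, h2, ⟨te, hm, hti, hdest⟩, hall⟩
    refine ⟨i, ?_⟩
    rw [PySem.Set.mem_diff]
    constructor
    · exact (pv_mem_fold_fst s e v L _ _ i).mpr
        (Or.inr ⟨te, hm, hti ▸ h1, hti ▸ h2, hdest, hti⟩)
    · intro hb
      rw [pv_mem_fold_snd] at hb
      rcases hb with hb | ⟨te', hm', _, _, hne, ht'⟩
      · cases hb
      · exact hne (hall te' hm' ht')

lemma pv_core (L : List (Int × (Int × Int))) (s e v : Int) :
    ((PySem.List.pyRange s e 1).any (fun i =>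
      decide ((PySem.Set.ofList (((L.filter (fun te => s ≤ te.1)).filter
          (fun te => te.1 = i)).map (fun te => te.2.2))).length = 1) &&
        PySem.Set.equal
          (PySem.Set.ofList (((L.filter (fun te => s ≤ te.1)).filter
            (fun te => te.1 = i)).map (fun te => te.2.2)))
          (PySem.Set.ofList [v]))) =
    (!(PySem.Set.diff
        (L.foldl
          (fun (gb : PySem.Set Int × PySem.Set Int) te =>
            if s ≤ te.1 ∧ te.1 < e then
              if te.2.2 = v then (PySem.Set.add gb.1 te.1, gb.2)
              else (gb.1, PySem.Set.add gb.2 te.1)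
            else gb) (PySem.Set.empty, PySem.Set.empty)).1
        (L.foldl
          (fun (gb : PySem.Set Int × PySem.Set Int) te =>
            if s ≤ te.1 ∧ te.1 < e then
              if te.2.2 = v then (PySem.Set.add gb.1 te.1, gb.2)
              else (gb.1, PySem.Set.add gb.2 te.1)
            else gb) (PySem.Set.empty, PySem.Set.empty)).2).isEmpty) := by
  rw [Bool.eq_iff_iff, pv_A_iff, pv_B_iff]

-- ===== VERDICT (by name: the statement is the Claim_ definition above) =====
theorem find_extended_mdd_conflict_spec : Claim_equal_find_extended_mdd_conflict := by
  intro mdds paths _ _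
  unfold Spec_find_extended_mdd_conflict find_extended_mdd_conflict find_extended_mdd_conflict_alt
  by_cases hse : ((min (paths.getD 0 []).length (paths.getD 1 []).length : Nat) : Int) =
      ((max (paths.getD 0 []).length (paths.getD 1 []).length : Nat) : Int)
  · simp only [hse, if_pos]
  · simp only [hse, if_false]
    by_cases hsw : (paths.getD 0 []).length > (paths.getD 1 []).length
    · simp only [hsw, if_pos]
      exact pv_core _ _ _ _
    · simp only [hsw, if_false]
      exact pv_core _ _ _ _
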